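-- pv_equiv track=rewrite | github.com/yay-robot/yay_robot | src/act/utils.py | _flatten_indices
-- ===== SOURCE A (Python) =====
-- def _flatten_indices(all_indices, last_dataset_indices, dataset_sizes):
--     flat_other_indices = []
--     flat_last_dataset_indices = []
--     cumulative_size = 0
--
--     for dataset_dir, size in dataset_sizes.items():
--         for idx in range(size):
--             if (dataset_dir, idx) in last_dataset_indices:
--                 flat_last_dataset_indices.append(cumulative_size + idx)
--             elif (dataset_dir, idx) in all_indices:
--                 flat_other_indices.append(cumulative_size + idx)
--         cumulative_size += size
--
--     return flat_other_indices, flat_last_dataset_indices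
-- ===== SOURCE B (Python) =====
-- def _flatten_indices(all_indices, last_dataset_indices, dataset_sizes):
--     # Group selected indices by dataset dir once, instead of scanning every
--     # global index: per-dataset sort + prefix offsets reproduce A's order.
--     by_last = {}
--     for d, i in last_dataset_indices:
--         by_last.setdefault(d, []).append(i)
--     by_other = {}
--     for d, i in all_indices:
--         if (d, i) not in last_dataset_indices:
--             by_other.setdefault(d, []).append(i)
--
--     flat_other_indices = []
--     flat_last_dataset_indices = []
--     offset = 0
--     for d, size in dataset_sizes.items():
--         for i in sorted(x for x in by_last.get(d, []) if 0 <= x < size):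
--             flat_last_dataset_indices.append(offset + i)
--         for i in sorted(x for x in by_other.get(d, []) if 0 <= x < size):
--             flat_other_indices.append(offset + i)
--         offset += size
--     return flat_other_indices, flat_last_dataset_indices
-- ===== Notes on version B (the rewrite author's own statement) =====
-- stated objective: alternative
-- what changed: Instead of scanning every global index of every dataset and testing set membership, B groups the selected (dir, idx) pairs by dataset dir once, then per dataset filters its group to range, sorts it and shifts by the running offset; it trades A's scan over all global indices for dictionary grouping plus per-dataset sorts.
import Mathlib
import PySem

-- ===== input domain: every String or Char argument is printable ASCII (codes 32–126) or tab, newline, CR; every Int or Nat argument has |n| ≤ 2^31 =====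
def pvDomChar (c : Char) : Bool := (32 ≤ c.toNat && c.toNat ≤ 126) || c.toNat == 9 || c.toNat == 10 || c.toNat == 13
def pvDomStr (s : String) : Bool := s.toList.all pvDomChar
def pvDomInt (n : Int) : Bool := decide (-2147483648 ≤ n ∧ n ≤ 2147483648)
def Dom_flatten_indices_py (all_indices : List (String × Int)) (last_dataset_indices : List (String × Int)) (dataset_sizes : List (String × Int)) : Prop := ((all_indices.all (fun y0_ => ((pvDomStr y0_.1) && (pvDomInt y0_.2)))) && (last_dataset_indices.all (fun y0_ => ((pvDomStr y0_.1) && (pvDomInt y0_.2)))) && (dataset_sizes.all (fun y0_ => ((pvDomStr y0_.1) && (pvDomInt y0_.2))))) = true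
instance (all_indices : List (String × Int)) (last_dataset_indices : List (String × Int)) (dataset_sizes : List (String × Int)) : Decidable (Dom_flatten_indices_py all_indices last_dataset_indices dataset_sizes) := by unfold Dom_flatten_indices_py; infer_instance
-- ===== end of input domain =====

-- B groups the selected (dir, idx) pairs by dataset dir once and per dataset sorts the
-- in-range indices of its group and shifts them by the running offset, instead of A's scan
-- over every global index with a membership test each (objective: alternative).

-- ===== PORT A =====
def flatten_indices_py (all_indices : List (String × Int)) (last_dataset_indices : List (String × Int)) (dataset_sizes : List (String × Int)) : List Int × List Int :=
  -- state: (flat_other_indices, flat_last_dataset_indices, cumulative_size)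
  let r := dataset_sizes.foldl (fun (st : List Int × List Int × Int) p =>
    let inner := (PySem.List.pyRange 0 p.2).foldl (fun (q : List Int × List Int) idx =>
        if (p.1, idx) ∈ last_dataset_indices then (q.1, q.2 ++ [st.2.2 + idx])
        else if (p.1, idx) ∈ all_indices then (q.1 ++ [st.2.2 + idx], q.2)
        else q) (st.1, st.2.1)
    (inner.1, inner.2, st.2.2 + p.2)) (([] : List Int), ([] : List Int), (0 : Int))
  (r.1, r.2.1)

-- ===== PORT B =====
def flatten_indices_py_alt (all_indices : List (String × Int)) (last_dataset_indices : List (String × Int)) (dataset_sizes : List (String × Int)) : List Int × List Int :=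
  let byLast : PySem.Dict String (List Int) :=
    last_dataset_indices.foldl (fun d p => d.modify p.1 [] (fun x => x ++ [p.2])) PySem.Dict.empty
  let byOther : PySem.Dict String (List Int) :=
    all_indices.foldl (fun d p =>
      if p ∈ last_dataset_indices then d else d.modify p.1 [] (fun x => x ++ [p.2])) PySem.Dict.empty
  -- state: (flat_other_indices, flat_last_dataset_indices, offset)
  let r := dataset_sizes.foldl (fun (st : List Int × List Int × Int) p =>
    let ls := PySem.List.sorted ((byLast.getD p.1 []).filter (fun x => decide (0 ≤ x ∧ x < p.2))) (fun x => x)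
    let os := PySem.List.sorted ((byOther.getD p.1 []).filter (fun x => decide (0 ≤ x ∧ x < p.2))) (fun x => x)
    (st.1 ++ os.map (fun i => st.2.2 + i), st.2.1 ++ ls.map (fun i => st.2.2 + i), st.2.2 + p.2))
    (([] : List Int), ([] : List Int), (0 : Int))
  (r.1, r.2.1)

-- ===== PRECONDITION & SPEC =====
-- Pre_ states only the representation invariants of the Python argument types: all_indices and
-- last_dataset_indices are Python sets (distinct elements) and dataset_sizes is a dict (distinct
-- keys); no call from Python can violate them, so no input A returns on is excluded.
def Pre_flatten_indices_py (all_indices : List (String × Int)) (last_dataset_indices : List (String × Int)) (dataset_sizes : List (String × Int)) : Prop :=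
  all_indices.Nodup ∧ last_dataset_indices.Nodup ∧ (dataset_sizes.map Prod.fst).Nodup
instance (all_indices : List (String × Int)) (last_dataset_indices : List (String × Int)) (dataset_sizes : List (String × Int)) : Decidable (Pre_flatten_indices_py all_indices last_dataset_indices dataset_sizes) := by unfold Pre_flatten_indices_py; infer_instance

def pvWitness_flatten_indices_py : (List (String × Int)) × (List (String × Int)) × (List (String × Int)) :=
  ([("a", 0), ("a", 1), ("b", 0)], [("a", 1)], [("a", 2), ("b", 1)])

def Spec_flatten_indices_py (all_indices : List (String × Int)) (last_dataset_indices : List (String × Int)) (dataset_sizes : List (String × Int)) (out : List Int × List Int) : Prop := out = flatten_indices_py_alt all_indices last_dataset_indices dataset_sizes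
instance (all_indices : List (String × Int)) (last_dataset_indices : List (String × Int)) (dataset_sizes : List (String × Int)) (out : List Int × List Int) : Decidable (Spec_flatten_indices_py all_indices last_dataset_indices dataset_sizes out) := by unfold Spec_flatten_indices_py; infer_instance

-- ===== CLAIM (what is proved, stated in full; the proofs are below) =====
def Claim_equal_flatten_indices_py : Prop := ∀ (all_indices : List (String × Int)) (last_dataset_indices : List (String × Int)) (dataset_sizes : List (String × Int)), Dom_flatten_indices_py all_indices last_dataset_indices dataset_sizes → Pre_flatten_indices_py all_indices last_dataset_indices dataset_sizes → Spec_flatten_indices_py all_indices last_dataset_indices dataset_sizes (flatten_indices_py all_indices last_dataset_indices dataset_sizes)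

-- ===== LEMMAS AND PROOFS =====

-- sorting the in-range indices of dir d taken from a Nodup pair list is exactly the increasing
-- scan of range(size) filtered by membership
lemma pvSortedGroup (L : List (String × Int)) (hL : L.Nodup) (d : String) (size : Int) :
    PySem.List.sorted (((L.filter (fun p => p.1 == d)).map (fun p => p.2)).filter
        (fun x => decide (0 ≤ x ∧ x < size))) (fun x => x)
      = (PySem.List.pyRange 0 size).filter (fun i => decide ((d, i) ∈ L)) := by
  apply PySem.List.sorted_eq_of_perm_of_pairwise_lt
  · have h1 : (((L.filter (fun p => p.1 == d)).map (fun p => p.2)).filter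
        (fun x => decide (0 ≤ x ∧ x < size))).Nodup := by
      refine List.Nodup.filter _ (List.Nodup.map_on ?_ (hL.filter _))
      intro p hp q hq hpq
      simp only [List.mem_filter, beq_iff_eq] at hp hq
      exact Prod.ext (hp.2.trans hq.2.symm) hpq
    have h2 : ((PySem.List.pyRange 0 size).filter (fun i => decide ((d, i) ∈ L))).Nodup :=
      List.Pairwise.filter _ ((PySem.List.pairwise_lt_pyRange_one 0 size).imp ne_of_lt)
    rw [List.perm_ext_iff_of_nodup h2 h1]
    intro a
    simp only [List.mem_filter, List.mem_map, PySem.List.mem_pyRange_one, beq_iff_eq,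
      decide_eq_true_eq]
    constructor
    · rintro ⟨⟨h0, hs⟩, hm⟩
      exact ⟨⟨(d, a), ⟨hm, rfl⟩, rfl⟩, h0, hs⟩
    · rintro ⟨⟨p, ⟨hp, hd⟩, hsnd⟩, h0, hs⟩
      refine ⟨⟨h0, hs⟩, ?_⟩
      have : p = (d, a) := Prod.ext hd hsnd
      rwa [this] at hp
  · exact List.Pairwise.filter _ (PySem.List.pairwise_lt_pyRange_one 0 size)

-- A's inner scan over a list of candidate indices splits into the two filtered, shifted lists
lemma pvInner (all L : List (String × Int)) (d : String) (cum : Int) :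
    ∀ (l : List Int) (fo fl : List Int),
      l.foldl (fun (q : List Int × List Int) idx =>
          if (d, idx) ∈ L then (q.1, q.2 ++ [cum + idx])
          else if (d, idx) ∈ all then (q.1 ++ [cum + idx], q.2)
          else q) (fo, fl)
        = (fo ++ (l.filter (fun i => decide (¬ (d, i) ∈ L ∧ (d, i) ∈ all))).map (fun i => cum + i),
           fl ++ (l.filter (fun i => decide ((d, i) ∈ L))).map (fun i => cum + i)) := by
  intro l
  induction l with
  | nil => intro fo fl; simp
  | cons i t ih =>
    intro fo fl
    by_cases h1 : (d, i) ∈ L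
    · simp [h1, ih]
    · by_cases h2 : (d, i) ∈ all <;> simp [h1, h2, ih]

-- the two grouping dicts of B, characterized
lemma pvByLast (L : List (String × Int)) (d : String) :
    (L.foldl (fun d p => d.modify p.1 [] (fun x => x ++ [p.2])) PySem.Dict.empty).getD d []
      = (L.filter (fun p => p.1 == d)).map (fun p => p.2) := by
  rw [PySem.Dict.getD_foldl_modify_append]
  simp [PySem.Dict.getD_empty]

lemma pvByOther (all L : List (String × Int)) (d : String) :
    ∀ (dd : PySem.Dict String (List Int)),
      (all.foldl (fun dd p =>
          if p ∈ L then dd else dd.modify p.1 [] (fun x => x ++ [p.2])) dd).getD d []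
        = dd.getD d []
          ++ (((all.filter (fun p => decide (¬ p ∈ L))).filter (fun p => p.1 == d)).map (fun p => p.2)) := by
  induction all with
  | nil => intro dd; simp
  | cons p t ih =>
    intro dd
    simp only [List.foldl_cons, List.filter_cons]
    by_cases h1 : p ∈ L
    · simp [h1, ih dd]
    · by_cases h2 : p.1 = d
      · subst h2
        simp [h1, ih, PySem.Dict.getD_modify_self]
      · simp [h1, h2, ih, PySem.Dict.getD_modify_of_ne _ _ _ (fun h => h2 h.symm)]

-- main outer loop equality, by induction on dataset_sizes
lemma pvOuter (all L : List (String × Int)) (hall : all.Nodup) (hL : L.Nodup) :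
    ∀ (ds : List (String × Int)) (fo fl : List Int) (cum : Int),
      ds.foldl (fun (st : List Int × List Int × Int) p =>
        let inner := (PySem.List.pyRange 0 p.2).foldl (fun (q : List Int × List Int) idx =>
            if (p.1, idx) ∈ L then (q.1, q.2 ++ [st.2.2 + idx])
            else if (p.1, idx) ∈ all then (q.1 ++ [st.2.2 + idx], q.2)
            else q) (st.1, st.2.1)
        (inner.1, inner.2, st.2.2 + p.2)) (fo, fl, cum)
      = ds.foldl (fun (st : List Int × List Int × Int) p =>
        let ls := PySem.List.sorted
          (((L.foldl (fun d p => d.modify p.1 [] (fun x => x ++ [p.2])) PySem.Dict.empty).getD p.1 []).filter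
            (fun x => decide (0 ≤ x ∧ x < p.2))) (fun x => x)
        let os := PySem.List.sorted
          (((all.foldl (fun d p => if p ∈ L then d else d.modify p.1 [] (fun x => x ++ [p.2]))
              PySem.Dict.empty).getD p.1 []).filter
            (fun x => decide (0 ≤ x ∧ x < p.2))) (fun x => x)
        (st.1 ++ os.map (fun i => st.2.2 + i), st.2.1 ++ ls.map (fun i => st.2.2 + i), st.2.2 + p.2))
        (fo, fl, cum) := by
  intro ds
  induction ds with
  | nil => intro fo fl cum; rfl
  | cons hd tl ih =>
    intro fo fl cum
    simp only [List.foldl_cons]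
    rw [pvInner all L hd.1 cum (PySem.List.pyRange 0 hd.2) fo fl]
    rw [pvByLast L hd.1, pvByOther all L hd.1 PySem.Dict.empty]
    simp only [PySem.Dict.getD_empty, List.nil_append]
    rw [pvSortedGroup L hL hd.1 hd.2, pvSortedGroup (all.filter (fun p => decide (¬ p ∈ L)))
      (hall.filter _) hd.1 hd.2]
    have hpred : List.filter (fun i => decide ((hd.1, i) ∈ all.filter (fun p => decide (¬ p ∈ L))))
        (PySem.List.pyRange 0 hd.2)
        = List.filter (fun i => decide (¬ (hd.1, i) ∈ L ∧ (hd.1, i) ∈ all))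
            (PySem.List.pyRange 0 hd.2) := by
      refine List.filter_congr (fun i _ => ?_)
      simp [List.mem_filter, and_comm]
    rw [hpred]
    exact ih _ _ _

-- ===== VERDICT (by name: the statement is the Claim_ definition above) =====
theorem flatten_indices_py_spec : Claim_equal_flatten_indices_py := by
  intro all_indices last_dataset_indices dataset_sizes _ hpre
  unfold Spec_flatten_indices_py flatten_indices_py flatten_indices_py_alt
  rw [pvOuter all_indices last_dataset_indices hpre.1 hpre.2.1 dataset_sizes [] [] 0]
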